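-- pv_equiv track=rewrite | github.com/Sharanya6/MazeSolver | MAZESOLVER.py | check
-- ===== SOURCE A (Python) =====
-- BLOCK = "#"
--
-- MOVE = "-"
--
-- def check(maze, x, y, solution, size):
--     ''' Trace out the way by backtracking method'''
--     if x == size - 1  and y == size - 1:
--          solution[x][y] = MOVE
--          return True
--     if is_safe(maze, x, y, size):
--          solution[x][y] = MOVE
--          if check(maze, x + 1, y, solution, size):
--              return True
--          if check(maze, x, y + 1, solution, size):
--              return True
--          solution[x][y] = BLOCK
--          return False
--     return False
--
-- def is_safe(maze, x, y, size):
--     '''Checks whether the path in which we are is safe that is it is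
--     not a block'''
--     return size > x >= 0 and size > y >= 0 and maze[x][y] == "-"
-- ===== SOURCE B (Python) =====
-- # B: bottom-up dynamic programme over the grid (one reachability table, each cell
-- # computed once) instead of A's recursive backtracking; side effects on `solution`
-- # differ from A's (B marks one found path, A also resets dead cells to "#") —
-- # the equivalence claimed is about the RETURN value only.
-- BLOCK = "#"
--
-- MOVE = "-"
--
-- def check(maze, x, y, solution, size):
--     if x == size - 1 and y == size - 1:
--         solution[x][y] = MOVE
--         return True
--     if not (0 <= x < size and 0 <= y < size and maze[x][y] == MOVE):
--         return False
--     # reachability table, rows i = size-1 .. x, cols j = size-1 .. y, each cell once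
--     table = {}
--     below = None
--     for i in range(size - 1, x - 1, -1):
--         row = []
--         right = False
--         for j in range(size - 1, y - 1, -1):
--             if i == size - 1 and j == size - 1:
--                 cell = True
--             elif maze[i][j] == MOVE:
--                 down = below[j - y] if below is not None else False
--                 cell = down or right
--             else:
--                 cell = False
--             row.insert(0, cell)
--             right = cell
--         table[i] = row
--         below = row
--     if not below[0]:
--         return False
--     # mark one down/right path in solution (mutation only; return value fixed)
--     i, j = x, y
--     while not (i == size - 1 and j == size - 1):
--         solution[i][j] = MOVE
--         if i + 1 < size and table[i + 1][j - y]: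
--             i += 1
--         else:
--             j += 1
--     solution[i][j] = MOVE
--     return True
-- ===== Notes on version B (the rewrite author's own statement) =====
-- stated objective: alternative
-- what changed: Replaced A's recursive backtracking search with a bottom-up dynamic-programming pass that computes each cell's reachability exactly once (rows bottom-to-top, columns right-to-left, keeping the row below).
-- outside the precondition, e.g. on check([['#']], 0, 0, [], 2): A returns False, B returns False; on check([['-', '-'], ['#', '-']], 0, 0, [['#']], 2): A raises IndexError, B raises IndexError; on check([['-']], 0, 0, [], 1): A raises IndexError, B raises IndexError
import Mathlib
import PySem

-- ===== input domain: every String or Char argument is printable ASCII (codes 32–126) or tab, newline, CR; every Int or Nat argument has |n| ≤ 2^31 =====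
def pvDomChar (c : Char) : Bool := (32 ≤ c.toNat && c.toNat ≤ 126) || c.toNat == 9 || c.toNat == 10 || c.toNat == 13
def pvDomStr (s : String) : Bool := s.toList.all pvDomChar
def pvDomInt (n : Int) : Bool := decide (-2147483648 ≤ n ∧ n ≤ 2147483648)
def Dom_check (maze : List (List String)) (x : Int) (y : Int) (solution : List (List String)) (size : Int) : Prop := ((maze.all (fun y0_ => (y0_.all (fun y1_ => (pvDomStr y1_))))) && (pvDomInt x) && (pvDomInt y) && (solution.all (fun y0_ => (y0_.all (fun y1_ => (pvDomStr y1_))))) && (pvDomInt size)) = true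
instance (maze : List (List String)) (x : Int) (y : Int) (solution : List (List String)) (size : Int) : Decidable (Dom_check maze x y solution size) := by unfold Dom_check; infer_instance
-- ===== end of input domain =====

-- B replaces A's recursive backtracking by a bottom-up reachability table (each cell
-- computed once).  A mutates `solution` (marks the path, resets dead cells); B marks one
-- found path only — the equivalence proved here is about the RETURN value only.

-- ===== PORT A =====
-- is_safe(maze, x, y, size); maze[x][y] via pyGet? (none = IndexError, excluded by Pre_)
def isSafe (maze : List (List String)) (x : Int) (y : Int) (size : Int) : Bool :=
  decide (size > x) && decide (x ≥ 0) && decide (size > y) && decide (y ≥ 0) &&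
    (((PySem.List.pyGet? maze x).bind (fun r => PySem.List.pyGet? r y)) == some "-")

-- termination measure facts for the port of A (cited by name in decreasing_by;
-- proved by small hand-written terms)
theorem check_dec_bounds (maze : List (List String)) (x : Int) (y : Int) (size : Int)
    (h : isSafe maze x y size = true) : x < size ∧ y < size := by
  have h1 := (Bool.and_eq_true_iff.mp h).1
  have h2 := (Bool.and_eq_true_iff.mp h1).1
  have h3 := (Bool.and_eq_true_iff.mp h2).1
  exact ⟨of_decide_eq_true (Bool.and_eq_true_iff.mp h3).1,
         of_decide_eq_true (Bool.and_eq_true_iff.mp h2).2⟩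

theorem check_dec_pos (x : Int) (y : Int) (size : Int) (hx : x < size) (hy : y < size) :
    0 < 2 * size - x - y := by
  have hp := add_pos (Int.sub_pos.mpr hx) (Int.sub_pos.mpr hy)
  have he : size - x + (size - y) = 2 * size - x - y := by ring
  exact he ▸ hp

theorem check_dec_down (maze : List (List String)) (x : Int) (y : Int) (size : Int)
    (h : isSafe maze x y size = true) :
    (2 * size - (x + 1) - y).toNat < (2 * size - x - y).toNat := by
  have hb := check_dec_bounds maze x y size h
  exact (Int.toNat_lt_toNat (check_dec_pos x y size hb.1 hb.2)).mpr
    (sub_lt_sub_right (sub_lt_sub_left (lt_add_one x) (2 * size)) y)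

theorem check_dec_right (maze : List (List String)) (x : Int) (y : Int) (size : Int)
    (h : isSafe maze x y size = true) :
    (2 * size - x - (y + 1)).toNat < (2 * size - x - y).toNat := by
  have hb := check_dec_bounds maze x y size h
  exact (Int.toNat_lt_toNat (check_dec_pos x y size hb.1 hb.2)).mpr
    (sub_lt_sub_left (lt_add_one y) (2 * size - x))

-- literal port of A's backtracking recursion; the writes to `solution` affect only the
-- mutated argument, not the return value, so they do not appear
def check (maze : List (List String)) (x : Int) (y : Int) (solution : List (List String)) (size : Int) : Bool :=
  if x == size - 1 && y == size - 1 then true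
  else if h : isSafe maze x y size then
    if check maze (x + 1) y solution size then true
    else if check maze x (y + 1) solution size then true
    else false
  else false
termination_by (2 * size - x - y).toNat
decreasing_by
  · exact check_dec_down maze x y size h
  · exact check_dec_right maze x y size h

-- ===== PORT B =====
-- `below[j - y] if below is not None else False`; the index is always in range in B's
-- traversal, so pyGetD is exact here
def belowGet (below : Option (List Bool)) (jy : Int) : Bool :=
  match below with
  | some b => PySem.List.pyGetD b jy false
  | none => false

-- body of B's inner loop: one column step (prepend the cell, remember it as `right`)
def rowStep (maze : List (List String)) (i : Int) (y : Int) (size : Int)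
    (below : Option (List Bool)) (st : List Bool × Bool) (j : Int) : List Bool × Bool :=
  let cell : Bool :=
    if i == size - 1 && j == size - 1 then true
    else if ((PySem.List.pyGet? maze i).bind (fun r => PySem.List.pyGet? r j)) == some "-" then
      belowGet below (j - y) || st.2
    else false
  (cell :: st.1, cell)

-- inner loop of B: one row of the reachability table, cols size-1 .. y, right to left
def checkAltRow (maze : List (List String)) (i : Int) (y : Int) (size : Int)
    (below : Option (List Bool)) : List Bool :=
  ((PySem.List.pyRange (size - 1) (y - 1) (-1)).foldl
    (rowStep maze i y size below) ([], false)).1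

-- B's path-marking loop mutates `solution` only and is omitted (return-value port)
def check_alt (maze : List (List String)) (x : Int) (y : Int) (solution : List (List String)) (size : Int) : Bool :=
  if x == size - 1 && y == size - 1 then true
  else if !(decide (0 ≤ x) && decide (x < size) && decide (0 ≤ y) && decide (y < size) &&
            (((PySem.List.pyGet? maze x).bind (fun r => PySem.List.pyGet? r y)) == some "-")) then false
  else
    match (PySem.List.pyRange (size - 1) (x - 1) (-1)).foldl
        (fun b i => some (checkAltRow maze i y size b)) (none : Option (List Bool)) with
    | some b => PySem.List.pyGetD b 0 false   -- below[0]; nonempty since the loop ran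
    | none => false

-- ===== PRECONDITION & SPEC =====
-- Pre_ excludes inputs on which Python A may raise IndexError: a start inside [0,size)²
-- while maze or solution is smaller than size×size (A can still return on some of those
-- when the explored cells happen to exist — see the cites in claim.json).
def Pre_check (maze : List (List String)) (x : Int) (y : Int) (solution : List (List String)) (size : Int) : Prop :=
  (1 ≤ size ∧ size.toNat ≤ maze.length ∧ (∀ r ∈ maze, size.toNat ≤ r.length) ∧
     size.toNat ≤ solution.length ∧ (∀ r ∈ solution, size.toNat ≤ r.length))
  ∨ (¬(x = size - 1 ∧ y = size - 1) ∧ ¬(0 ≤ x ∧ x < size ∧ 0 ≤ y ∧ y < size))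
instance (maze : List (List String)) (x : Int) (y : Int) (solution : List (List String)) (size : Int) : Decidable (Pre_check maze x y solution size) := by unfold Pre_check; infer_instance

def pvWitness_check : List (List String) × Int × Int × List (List String) × Int :=
  ([["-", "-"], ["#", "-"]], 0, 0, [["#", "#"], ["#", "#"]], 2)

def Spec_check (maze : List (List String)) (x : Int) (y : Int) (solution : List (List String)) (size : Int) (out : Bool) : Prop := out = check_alt maze x y solution size
instance (maze : List (List String)) (x : Int) (y : Int) (solution : List (List String)) (size : Int) (out : Bool) : Decidable (Spec_check maze x y solution size out) := by unfold Spec_check; infer_instance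

-- ===== CLAIM (what is proved, stated in full; the proofs are below) =====
def Claim_equal_check : Prop := ∀ (maze : List (List String)) (x : Int) (y : Int) (solution : List (List String)) (size : Int), Dom_check maze x y solution size → Pre_check maze x y solution size → Spec_check maze x y solution size (check maze x y solution size)

-- ===== LEMMAS AND PROOFS =====

-- A's recursion out of the grid on the right / below: always false
theorem check_col_out (maze : List (List String)) (i : Int) (solution : List (List String)) (size : Int) :
    check maze i size solution size = false := by
  rw [check]
  simp [isSafe]
  omega

theorem check_row_out (maze : List (List String)) (j : Int) (solution : List (List String)) (size : Int) :
    check maze size j solution size = false := by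
  rw [check]
  simp [isSafe]
  omega

-- one step of B's inner loop computes A's value at that cell
theorem step_eq (maze : List (List String)) (solution : List (List String))
    (i y size j : Int) (below : Option (List Bool))
    (hi0 : 0 ≤ i) (hi : i ≤ size - 1) (hj0 : 0 ≤ j) (hj : j ≤ size - 1)
    (hb : belowGet below (j - y) = check maze (i + 1) j solution size)
    (acc : List Bool) (r : Bool) (hr : r = check maze i (j + 1) solution size) :
    rowStep maze i y size below (acc, r) j
      = (check maze i j solution size :: acc, check maze i j solution size) := by
  have hcell : (if i == size - 1 && j == size - 1 then true
      else if ((PySem.List.pyGet? maze i).bind (fun rw => PySem.List.pyGet? rw j)) == some "-" then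
        belowGet below (j - y) || r
      else (false : Bool)) = check maze i j solution size := by
    rw [check]
    by_cases hg : (i == size - 1 && j == size - 1) = true
    · simp [hg]
    · have h1 : i < size := by omega
      have h2 : j < size := by omega
      have hsafe : isSafe maze i j size =
          (((PySem.List.pyGet? maze i).bind (fun rw => PySem.List.pyGet? rw j)) == some "-") := by
        simp [isSafe, h1, h2, hi0, hj0]
      simp only [hg, if_false, Bool.false_eq_true]
      rw [hsafe]
      by_cases hm : (((PySem.List.pyGet? maze i).bind (fun rw => PySem.List.pyGet? rw j)) == some "-") = true
      · simp only [hm, if_true]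
        rw [hb, hr]
        cases check maze (i + 1) j solution size <;>
          cases check maze i (j + 1) solution size <;> simp
      · simp [hm]
  simp only [rowStep]
  rw [hcell]

-- the inner fold over cols k .. y produces A's values for those cells
theorem row_fold (maze : List (List String)) (solution : List (List String))
    (i y size : Int) (below : Option (List Bool))
    (hy0 : 0 ≤ y) (hi0 : 0 ≤ i) (hi : i ≤ size - 1)
    (hb : ∀ j : Int, y ≤ j → j ≤ size - 1 →
      belowGet below (j - y) = check maze (i + 1) j solution size) :
    ∀ (n : Nat) (k : Int), k = y - 1 + n → k ≤ size - 1 →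
      ∀ (acc : List Bool) (r : Bool), r = check maze i (k + 1) solution size →
      ((PySem.List.pyRange k (y - 1) (-1)).foldl (rowStep maze i y size below) (acc, r)).1
      = ((PySem.List.pyRange y (k + 1) 1).map (fun j => check maze i j solution size)) ++ acc := by
  intro n
  induction n with
  | zero =>
    intro k hk hks acc r hr
    have h1 : k = y - 1 := by omega
    subst h1
    rw [PySem.List.pyRange_neg_one_eq_nil (by omega), PySem.List.pyRange_one_eq_nil (by omega)]
    simp
  | succ m ih =>
    intro k hk hks acc r hr
    have hyk : y ≤ k := by omega
    rw [PySem.List.pyRange_neg_one_cons (by omega : y - 1 < k)]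
    simp only [List.foldl_cons]
    rw [step_eq maze solution i y size k below hi0 hi (by omega) hks (hb k hyk hks) acc r hr]
    have harg : k - 1 + 1 = k := by ring
    rw [ih (k - 1) (by omega) (by omega) (check maze i k solution size :: acc)
        (check maze i k solution size) (by rw [harg])]
    rw [harg, PySem.List.pyRange_one_succ_right hyk, List.map_append, List.append_assoc]
    simp

-- a full row: checkAltRow is A's value at every column of the row
theorem row_values (maze : List (List String)) (solution : List (List String))
    (i y size : Int) (below : Option (List Bool))
    (hy0 : 0 ≤ y) (hy : y ≤ size - 1) (hi0 : 0 ≤ i) (hi : i ≤ size - 1)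
    (hb : ∀ j : Int, y ≤ j → j ≤ size - 1 →
      belowGet below (j - y) = check maze (i + 1) j solution size) :
    checkAltRow maze i y size below
      = (PySem.List.pyRange y size 1).map (fun j => check maze i j solution size) := by
  unfold checkAltRow
  have := row_fold maze solution i y size below hy0 hi0 hi hb (size - y).toNat (size - 1)
    (by omega) (by omega) [] false (by rw [show size - 1 + 1 = size by ring, check_col_out])
  rw [this]
  simp [show size - 1 + 1 = size by ring]

-- reading the produced row back: belowGet of it at column j is A's value
theorem row_get (maze : List (List String)) (solution : List (List String))
    (i y size j : Int) (hj : y ≤ j) (hjs : j ≤ size - 1) :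
    belowGet (some ((PySem.List.pyRange y size 1).map
        (fun j => check maze i j solution size))) (j - y)
      = check maze i j solution size := by
  simp only [belowGet]
  have hcast : j - y = (((j - y).toNat : Nat) : Int) := by omega
  rw [hcast, PySem.List.pyGetD_map_pyRange_one _ y size _ false (by omega)]
  congr 1
  omega

-- the outer fold over rows k .. x: its final state reads back A's values for row x
theorem outer_fold (maze : List (List String)) (solution : List (List String))
    (x y size : Int) (hy0 : 0 ≤ y) (hy : y ≤ size - 1) (hx0 : 0 ≤ x) :
    ∀ (n : Nat) (k : Int), k = x - 1 + n → k ≤ size - 1 →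
      ∀ (b : Option (List Bool)),
      (∀ j : Int, y ≤ j → j ≤ size - 1 →
        belowGet b (j - y) = check maze (k + 1) j solution size) →
      ∀ j : Int, y ≤ j → j ≤ size - 1 →
      belowGet ((PySem.List.pyRange k (x - 1) (-1)).foldl
          (fun b i => some (checkAltRow maze i y size b)) b) (j - y)
        = check maze x j solution size := by
  intro n
  induction n with
  | zero =>
    intro k hk hks b hb j hj hjs
    have h1 : k = x - 1 := by omega
    subst h1
    rw [PySem.List.pyRange_neg_one_eq_nil (by omega)]
    simpa [show x - 1 + 1 = x by ring] using hb j hj hjs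
  | succ m ih =>
    intro k hk hks b hb j hj hjs
    rw [PySem.List.pyRange_neg_one_cons (by omega : x - 1 < k)]
    simp only [List.foldl_cons]
    refine ih (k - 1) (by omega) (by omega) _ ?_ j hj hjs
    intro j' hj' hjs'
    rw [row_values maze solution k y size b hy0 hy (by omega) (by omega) hb]
    rw [row_get maze solution k y size j' hj' hjs']
    congr 1
    omega

-- the two ports agree on ALL inputs (the precondition is only about Python A's raises)
theorem check_eq_check_alt (maze : List (List String)) (x : Int) (y : Int)
    (solution : List (List String)) (size : Int) :
    check maze x y solution size = check_alt maze x y solution size := by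
  unfold check_alt
  by_cases hg : (x == size - 1 && y == size - 1) = true
  · rw [check]; simp [hg]
  · by_cases hs : isSafe maze x y size = true
    · have hb : (decide (0 ≤ x) && decide (x < size) && decide (0 ≤ y) && decide (y < size) &&
          (((PySem.List.pyGet? maze x).bind (fun r => PySem.List.pyGet? r y)) == some "-")) = true := by
        simp [isSafe] at hs
        simp [hs]
      simp only [hg, if_false, hb, Bool.not_true, Bool.false_eq_true]
      have hxb : 0 ≤ x ∧ x < size := by simp [isSafe] at hs; omega
      have hyb : 0 ≤ y ∧ y < size := by simp [isSafe] at hs; omega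
      have hmain := outer_fold maze solution x y size hyb.1 (by omega) hxb.1
        (size - x).toNat (size - 1) (by omega) (by omega) none
        (by intro j hj hjs
            simp only [belowGet]
            rw [show size - 1 + 1 = size by ring, check_row_out])
        y le_rfl (by omega)
      simp only [sub_self] at hmain
      cases hres : (PySem.List.pyRange (size - 1) (x - 1) (-1)).foldl
          (fun b i => some (checkAltRow maze i y size b)) (none : Option (List Bool)) with
      | none => rw [hres] at hmain; simp only [belowGet] at hmain; exact hmain.symm
      | some b => rw [hres] at hmain; simp only [belowGet] at hmain; exact hmain.symm
    · have hb : (decide (0 ≤ x) && decide (x < size) && decide (0 ≤ y) && decide (y < size) &&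
          (((PySem.List.pyGet? maze x).bind (fun r => PySem.List.pyGet? r y)) == some "-")) = false := by
        simp [isSafe] at hs
        by_cases h1 : 0 ≤ x
        · by_cases h2 : x < size
          · by_cases h3 : 0 ≤ y
            · by_cases h4 : y < size
              · simp [h1, h2, h3, h4]
                exact hs (by omega) (by omega) (by omega) (by omega)
              · simp [h4]
            · simp [h3]
          · simp [h2]
        · simp [h1]
      rw [check]
      simp [hg, hs, hb]

-- ===== VERDICT (by name: the statement is the Claim_ definition above) =====
theorem check_spec : Claim_equal_check := by
  intro maze x y solution size _ _
  unfold Spec_check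
  exact check_eq_check_alt maze x y solution size
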